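-- pv_equiv track=rewrite | github.com/vishwamartur/exness | utils/correlation_filter.py | get_correlated_symbols
-- ===== SOURCE A (Python) =====
-- CORRELATION_GROUPS = {
--     'eur_usd': {
--         'symbols': ['EURUSD', 'EURGBP', 'EURJPY', 'EURAUD', 'EURCAD', 'EURCHF', 'EURNZD'],
--         'inverse': ['USDCHF', 'USDCAD'],
--     },
--     'gbp_usd': {
--         'symbols': ['GBPUSD', 'GBPJPY', 'GBPAUD', 'GBPCAD', 'GBPCHF', 'GBPNZD'],
--         'inverse': [],
--     },
--     'risk_on': {
--         'symbols': ['AUDUSD', 'NZDUSD', 'AUDJPY', 'NZDJPY', 'AUDCAD', 'AUDNZD'],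
--         'inverse': ['USDCAD', 'USDJPY'],
--     },
--     'jpy_safe_haven': {
--         'symbols': ['USDJPY', 'EURJPY', 'GBPJPY', 'AUDJPY', 'NZDJPY', 'CADJPY', 'CHFJPY'],
--         'inverse': [],
--     },
--     'metals': {
--         'symbols': ['XAUUSD', 'XAGUSD'],
--         'inverse': ['USDJPY', 'USDCHF'],
--     },
--     'crypto': {
--         'symbols': ['BTCUSD', 'ETHUSD', 'LTCUSD', 'XRPUSD', 'BCHUSD'],
--         'inverse': [],
--     },
--     'energy': {
--         'symbols': ['USOIL', 'UKOIL'],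
--         'inverse': [],
--     },
-- }
--
-- def _strip_suffix(symbol):
--     """Strips Exness suffixes (m, c) from symbol name for matching."""
--     for suffix in ['m', 'c']:
--         if symbol.endswith(suffix) and len(symbol) > 3:
--             # Make sure we're not stripping part of the actual name
--             base = symbol[:-len(suffix)]
--             if len(base) >= 6:  # Minimum forex pair length
--                 return base
--     return symbol
--
-- def get_correlated_symbols(symbol):
--     """Returns all symbols correlated with the given symbol."""
--     base = _strip_suffix(symbol)
--     correlated = set()
--
--     for group_name, group in CORRELATION_GROUPS.items():
--         all_in_group = group['symbols'] + group.get('inverse', [])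
--         if base in all_in_group:
--             for s in group['symbols']:
--                 correlated.add(s)
--             for s in group.get('inverse', []):
--                 correlated.add(s)
--
--     # Remove the symbol itself
--     correlated.discard(base)
--     return correlated
-- ===== SOURCE B (Python) =====
-- # Flat one-time index: each known symbol -> its resolved correlated set; call is a dict lookup.
-- _GROUPS = [g.split() for g in [
--     'EURUSD EURGBP EURJPY EURAUD EURCAD EURCHF EURNZD USDCHF USDCAD',
--     'GBPUSD GBPJPY GBPAUD GBPCAD GBPCHF GBPNZD',
--     'AUDUSD NZDUSD AUDJPY NZDJPY AUDCAD AUDNZD USDCAD USDJPY',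
--     'USDJPY EURJPY GBPJPY AUDJPY NZDJPY CADJPY CHFJPY',
--     'XAUUSD XAGUSD USDJPY USDCHF',
--     'BTCUSD ETHUSD LTCUSD XRPUSD BCHUSD',
--     'USOIL UKOIL',
-- ]]
--
-- def _build_index():
--     index = {}
--     for members in _GROUPS:
--         for s in members:
--             index.setdefault(s, set()).update(members)
--     return {s: corr - {s} for s, corr in index.items()}
--
-- _INDEX = _build_index()
--
-- def get_correlated_symbols(symbol):
--     """Returns all symbols correlated with the given symbol (single dict lookup)."""
--     base = symbol[:-1] if len(symbol) >= 7 and symbol.endswith(('m', 'c')) else symbol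
--     return set(_INDEX.get(base, ()))
-- ===== Notes on version B (the rewrite author's own statement) =====
-- stated objective: faster
-- what changed: Instead of scanning every correlation group on each call, B builds a module-level index once (each known symbol mapped to its resolved correlated set, self removed, from a flat member-list table) and the call is a single guarded-slice suffix strip plus one dict lookup returning a fresh set.
import Mathlib
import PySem

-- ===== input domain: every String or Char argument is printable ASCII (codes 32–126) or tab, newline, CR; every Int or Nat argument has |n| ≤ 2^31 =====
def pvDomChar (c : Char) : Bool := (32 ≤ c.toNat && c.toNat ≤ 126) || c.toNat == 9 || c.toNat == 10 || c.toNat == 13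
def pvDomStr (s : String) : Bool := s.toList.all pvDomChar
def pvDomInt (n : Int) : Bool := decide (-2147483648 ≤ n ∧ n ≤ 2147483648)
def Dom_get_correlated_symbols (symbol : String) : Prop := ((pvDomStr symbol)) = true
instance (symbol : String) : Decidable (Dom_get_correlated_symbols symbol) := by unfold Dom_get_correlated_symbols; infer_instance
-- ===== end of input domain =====

-- B replaces A's per-call scan over all correlation groups by one lookup in a module-level index
-- built once from a flat member-list table; return-value equivalence is proved for every string.

-- ===== PORT A =====
-- CORRELATION_GROUPS: name -> (symbols, inverse), insertion order
def pvGroups : List (String × List String × List String) :=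
  [("eur_usd", (["EURUSD", "EURGBP", "EURJPY", "EURAUD", "EURCAD", "EURCHF", "EURNZD"], ["USDCHF", "USDCAD"])),
   ("gbp_usd", (["GBPUSD", "GBPJPY", "GBPAUD", "GBPCAD", "GBPCHF", "GBPNZD"], [])),
   ("risk_on", (["AUDUSD", "NZDUSD", "AUDJPY", "NZDJPY", "AUDCAD", "AUDNZD"], ["USDCAD", "USDJPY"])),
   ("jpy_safe_haven", (["USDJPY", "EURJPY", "GBPJPY", "AUDJPY", "NZDJPY", "CADJPY", "CHFJPY"], [])),
   ("metals", (["XAUUSD", "XAGUSD"], ["USDJPY", "USDCHF"])),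
   ("crypto", (["BTCUSD", "ETHUSD", "LTCUSD", "XRPUSD", "BCHUSD"], [])),
   ("energy", (["USOIL", "UKOIL"], []))]

-- _strip_suffix: the 'for suffix in ['m','c']' loop with its early return
def pvStripGo (symbol : String) : List String → String
  | [] => symbol
  | suf :: rest =>
    if PySem.Str.endswith symbol suf && decide (3 < PySem.Str.len symbol) then
      let base := PySem.Str.slice symbol none (some (-(PySem.Str.len suf)))
      if 6 ≤ PySem.Str.len base then base else pvStripGo symbol rest
    else pvStripGo symbol rest

def pv_strip_suffix (symbol : String) : String := pvStripGo symbol ["m", "c"]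

-- the 'for group_name, group in CORRELATION_GROUPS.items()' loop building 'correlated'
def pvCorrelLoop (base : String) : PySem.Set String :=
  pvGroups.foldl (fun correlated g =>
    let allInGroup := g.2.1 ++ g.2.2
    if base ∈ allInGroup then
      let correlated := g.2.1.foldl (fun c s => PySem.Set.add c s) correlated
      g.2.2.foldl (fun c s => PySem.Set.add c s) correlated
    else correlated) PySem.Set.empty

def get_correlated_symbols (symbol : String) : List String :=
  let base := pv_strip_suffix symbol
  PySem.Set.discard (pvCorrelLoop base) base

-- ===== PORT B =====
-- _GROUPS: '[g.split() for g in [...]]' — a flat table of each group's combined member list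
def pvGroupsB : List (List String) :=
  ["EURUSD EURGBP EURJPY EURAUD EURCAD EURCHF EURNZD USDCHF USDCAD",
   "GBPUSD GBPJPY GBPAUD GBPCAD GBPCHF GBPNZD",
   "AUDUSD NZDUSD AUDJPY NZDJPY AUDCAD AUDNZD USDCAD USDJPY",
   "USDJPY EURJPY GBPJPY AUDJPY NZDJPY CADJPY CHFJPY",
   "XAUUSD XAGUSD USDJPY USDCHF",
   "BTCUSD ETHUSD LTCUSD XRPUSD BCHUSD",
   "USOIL UKOIL"].map PySem.Str.split₀

-- _build_index / _INDEX: 'index.setdefault(s, set()).update(members)' updates the set stored at s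
-- in place, i.e. re-stores the updated set; the final dict comprehension maps 'corr - {s}' over items.
def pvIndexB : PySem.Dict String (PySem.Set String) :=
  let index := pvGroupsB.foldl (fun index members =>
    members.foldl (fun index s =>
      index.insert s (PySem.Set.update (index.getD s PySem.Set.empty) members)) index)
    PySem.Dict.empty
  PySem.Dict.mk (index.items.map (fun p =>
    (p.1, PySem.Set.diff p.2 (PySem.Set.add PySem.Set.empty p.1))))

def get_correlated_symbols_alt (symbol : String) : List String :=
  let base :=
    if 7 ≤ PySem.Str.len symbol &&
       (PySem.Str.endswith symbol "m" || PySem.Str.endswith symbol "c") then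
      PySem.Str.slice symbol none (some (-1))
    else symbol
  PySem.Set.ofList (pvIndexB.getD base PySem.Set.empty)

-- ===== PRECONDITION & SPEC =====
def Spec_get_correlated_symbols (symbol : String) (out : List String) : Prop := out = get_correlated_symbols_alt symbol
instance (symbol : String) (out : List String) : Decidable (Spec_get_correlated_symbols symbol out) := by unfold Spec_get_correlated_symbols; infer_instance

-- ===== CLAIM (what is proved, stated in full; the proofs are below) =====
def Claim_equal_get_correlated_symbols : Prop := ∀ (symbol : String), Dom_get_correlated_symbols symbol → Spec_get_correlated_symbols symbol (get_correlated_symbols symbol)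

-- ===== LEMMAS AND PROOFS =====

-- a string cannot end with both 'm' and 'c'
lemma pv_mc (l : List Char) (h1 : ['m'] <:+ l) (h2 : ['c'] <:+ l) : False := by
  obtain ⟨t1, rfl⟩ := h1
  obtain ⟨t2, ht⟩ := h2
  exact absurd ((List.append_inj' ht (by simp)).2) (by decide)

-- A's and B's suffix strips agree: A strips one trailing 'm'/'c' exactly when the base keeps
-- length ≥ 6, i.e. when len(symbol) ≥ 7; 'm' and 'c' cannot both be the last character.
set_option maxHeartbeats 1000000 in
lemma pvStrip_eq (symbol : String) :
    pv_strip_suffix symbol =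
      (if 7 ≤ PySem.Str.len symbol &&
          (PySem.Str.endswith symbol "m" || PySem.Str.endswith symbol "c") then
        PySem.Str.slice symbol none (some (-1))
      else symbol) := by
  have h1 : PySem.Str.len "m" = 1 := by decide
  have h2 : PySem.Str.len "c" = 1 := by decide
  have hsl : symbol.length = symbol.toList.length := String.length_toList.symm
  have hslice : (PySem.List.slice symbol.toList none (some (-1))).length
      = symbol.toList.length - 1 := by
    rw [PySem.List.slice_to_neg_one]; exact List.length_dropLast
  have hmm : PySem.Chars.endswith symbol.toList ['m'] = true → ['m'] <:+ symbol.toList :=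
    (PySem.Chars.endswith_iff _ _).mp
  have hcc : PySem.Chars.endswith symbol.toList ['c'] = true → ['c'] <:+ symbol.toList :=
    (PySem.Chars.endswith_iff _ _).mp
  simp only [pv_strip_suffix, pvStripGo, h1, h2]
  simp
  by_cases em : PySem.Chars.endswith symbol.toList ['m'] = true <;>
    by_cases ec : PySem.Chars.endswith symbol.toList ['c'] = true
  · exact absurd (pv_mc _ (hmm em) (hcc ec)) not_false
  all_goals simp [em, ec]
  all_goals split_ifs <;> first | rfl | omega

-- all symbols occurring in any group, first occurrences in order (= pvIndexB.keys)
def pvK : List String :=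
  ["EURUSD", "EURGBP", "EURJPY", "EURAUD", "EURCAD", "EURCHF", "EURNZD", "USDCHF", "USDCAD",
   "GBPUSD", "GBPJPY", "GBPAUD", "GBPCAD", "GBPCHF", "GBPNZD", "AUDUSD", "NZDUSD", "AUDJPY",
   "NZDJPY", "AUDCAD", "AUDNZD", "USDJPY", "CADJPY", "CHFJPY", "XAUUSD", "XAGUSD", "BTCUSD",
   "ETHUSD", "LTCUSD", "XRPUSD", "BCHUSD", "USOIL", "UKOIL"]

lemma pvLoopNop (b : String) (gs : List (String × List String × List String))
    (acc : PySem.Set String) (h : ∀ g ∈ gs, b ∉ g.2.1 ++ g.2.2) :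
    gs.foldl (fun correlated g =>
      let allInGroup := g.2.1 ++ g.2.2
      if b ∈ allInGroup then
        let correlated := g.2.1.foldl (fun c s => PySem.Set.add c s) correlated
        g.2.2.foldl (fun c s => PySem.Set.add c s) correlated
      else correlated) acc = acc := by
  induction gs generalizing acc with
  | nil => rfl
  | cons g gs ih =>
    rw [List.foldl_cons]
    have hg := h g (List.mem_cons_self ..)
    simp only [if_neg hg]
    exact ih acc (fun g' hg' => h g' (List.mem_cons_of_mem _ hg'))

set_option maxRecDepth 100000 in
lemma pvCore_eq (b : String) :
    PySem.Set.discard (pvCorrelLoop b) b = PySem.Set.ofList (pvIndexB.getD b PySem.Set.empty) := by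
  by_cases hb : b ∈ pvK
  · simp only [pvK, List.mem_cons, List.not_mem_nil, or_false] at hb
    rcases hb with rfl|rfl|rfl|rfl|rfl|rfl|rfl|rfl|rfl|rfl|rfl|rfl|rfl|rfl|rfl|rfl|rfl|rfl|rfl|rfl|rfl|rfl|rfl|rfl|rfl|rfl|rfl|rfl|rfl|rfl|rfl|rfl|rfl <;> decide
  · have hkeys : PySem.Dict.keys pvIndexB = pvK := by decide
    have hc : pvIndexB.contains b = false := by
      rw [PySem.Dict.contains_eq_decide_mem_keys, hkeys]; simp [hb]
    rw [PySem.Dict.getD_of_not_contains _ _ hc]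
    have hA : pvCorrelLoop b = PySem.Set.empty := by
      unfold pvCorrelLoop
      apply pvLoopNop
      intro g hg
      fin_cases hg <;> exact fun h => hb ((by decide : _ ⊆ pvK) h)
    rw [hA]; rfl

-- ===== VERDICT (by name: the statement is the Claim_ definition above) =====
theorem get_correlated_symbols_spec : Claim_equal_get_correlated_symbols := by
  intro symbol _
  unfold Spec_get_correlated_symbols get_correlated_symbols get_correlated_symbols_alt
  rw [pvStrip_eq]
  exact pvCore_eq _
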